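-- pv_equiv track=rewrite | github.com/yakkovwaxelbom/work-basket | pyton/simple transaction/pyton/sorts/sorts.py | __radix_counting_sort
-- ===== SOURCE A (Python) =====
-- def __radix_counting_sort(array, base=10):
--     count = [0] * base
--     result = [''] * len(array)
--
--     for d in range(len(array[0]) - 1, -1, -1):
--         for i in range(len(array)):
--             x = int(array[i][d], base)
--             count[x] += 1
--
--         for i in range(1, len(count)):
--             count[i] += count[i - 1]
--
--         for i in range(len(array) - 1, -1, -1):
--             x = int(array[i][d], base)
--             count_index = count[x] - 1
--             result[count_index] = array[i]
--             count[x] -= 1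
--
--         for i in range(len(array)):
--             array[i] = result[i]
--         count = [0] * base
--
--     return array
-- ===== SOURCE B (Python) =====
-- def __radix_counting_sort(array, base=10):
--     # Bucket-distribution LSD radix sort: same stable digit passes as the
--     # counting-sort version, but each pass distributes into `base` buckets and
--     # flattens them, replacing the histogram/prefix-sum/reverse-placement
--     # passes.  Mutates `array` in place and returns it, like the original.
--     for d in range(len(array[0]) - 1, -1, -1):
--         buckets = [[] for _ in range(base)]
--         for s in array:
--             buckets[int(s[d], base)].append(s)
--         array[:] = [s for b in buckets for s in b]
--     return array
-- ===== Notes on version B (the rewrite author's own statement) =====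
-- stated objective: faster
-- what changed: Each digit pass now distributes the strings into `base` buckets in one forward scan and flattens them back, instead of counting-sort's three extra passes (histogram, cumulative counts, reverse placement into a scratch array).
import Mathlib
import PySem

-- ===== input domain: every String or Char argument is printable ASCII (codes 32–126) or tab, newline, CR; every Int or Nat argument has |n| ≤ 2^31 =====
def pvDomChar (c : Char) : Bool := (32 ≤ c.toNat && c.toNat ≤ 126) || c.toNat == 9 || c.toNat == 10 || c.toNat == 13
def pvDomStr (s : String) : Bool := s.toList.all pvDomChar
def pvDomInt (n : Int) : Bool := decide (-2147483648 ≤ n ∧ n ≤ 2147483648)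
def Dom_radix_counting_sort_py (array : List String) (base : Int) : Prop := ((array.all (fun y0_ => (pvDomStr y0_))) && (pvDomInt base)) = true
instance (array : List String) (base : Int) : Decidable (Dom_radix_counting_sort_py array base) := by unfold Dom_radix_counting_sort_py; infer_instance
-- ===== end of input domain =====

-- B replaces counting sort's histogram/prefix-sum/reverse-placement digit passes by bucket
-- distribution and flattening (objective: faster by a constant factor — fewer passes).
-- Both Pythons sort `array` in place and return it; the theorems below are about the return value.

-- ===== PORT A =====
-- x = int(array[i][d], base)  (single character; .getD arms are unreachable under Pre_)
def pvKey (base d : Int) (s : String) : Int :=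
  (PySem.Int.ofCharsBase? [(PySem.Str.pyGet? s d).getD ' '] base).getD 0

-- for i in range(len(array)): x = int(array[i][d], base); count[x] += 1
def pvPassCount (base d : Int) (arr : List String) (cnt : List Int) : List Int :=
  (PySem.List.pyRange 0 (arr.length : Int) 1).foldl (fun c i =>
    let x := pvKey base d (PySem.List.pyGetD arr i "")
    PySem.List.pySetD c x (PySem.List.pyGetD c x 0 + 1)) cnt

-- for i in range(1, len(count)): count[i] += count[i-1]
def pvPassPrefix (cnt : List Int) : List Int :=
  (PySem.List.pyRange 1 (cnt.length : Int) 1).foldl (fun c i =>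
    PySem.List.pySetD c i (PySem.List.pyGetD c i 0 + PySem.List.pyGetD c (i - 1) 0)) cnt

-- for i in range(len(array)-1, -1, -1): x = int(...); result[count[x]-1] = array[i]; count[x] -= 1
def pvPassPlace (base d : Int) (arr : List String) (cnt : List Int) (res : List String) :
    List Int × List String :=
  (PySem.List.pyRange ((arr.length : Int) - 1) (-1) (-1)).foldl (fun p i =>
    let x := pvKey base d (PySem.List.pyGetD arr i "")
    let ci := PySem.List.pyGetD p.1 x 0 - 1
    (PySem.List.pySetD p.1 x (PySem.List.pyGetD p.1 x 0 - 1),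
     PySem.List.pySetD p.2 ci (PySem.List.pyGetD arr i ""))) (cnt, res)

-- for i in range(len(array)): array[i] = result[i]
def pvPassCopy (arr res : List String) : List String :=
  (PySem.List.pyRange 0 (arr.length : Int) 1).foldl (fun a i =>
    PySem.List.pySetD a i (PySem.List.pyGetD res i "")) arr

def radix_counting_sort_py (array : List String) (base : Int) : List String :=
  let count := List.replicate base.toNat (0 : Int)
  let result := List.replicate array.length ""
  let fin := (PySem.List.pyRange (PySem.Str.len (PySem.List.pyGetD array 0 "") - 1) (-1) (-1)).foldl
    (fun st d =>
      let cnt1 := pvPassCount base d st.1 st.2.2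
      let cnt2 := pvPassPrefix cnt1
      let pr := pvPassPlace base d st.1 cnt2 st.2.1
      let res3 := pr.2
      let arr4 := pvPassCopy st.1 res3
      (arr4, res3, List.replicate base.toNat (0 : Int)))
    (array, result, count)
  fin.1

-- ===== PORT B =====
-- buckets = [[] for _ in range(base)]; for s in array: buckets[int(s[d], base)].append(s)
def pvPassBuckets (base d : Int) (arr : List String) : List (List String) :=
  arr.foldl (fun bs s =>
    let x := pvKey base d s
    PySem.List.pySetD bs x (PySem.List.pyGetD bs x [] ++ [s]))
    (List.replicate base.toNat ([] : List String))

def radix_counting_sort_py_alt (array : List String) (base : Int) : List String :=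
  (PySem.List.pyRange (PySem.Str.len (PySem.List.pyGetD array 0 "") - 1) (-1) (-1)).foldl
    (fun arr d => (pvPassBuckets base d arr).flatten) array

-- ===== PRECONDITION & SPEC =====
-- int(c, base) succeeds on the single character c (and then its value is automatically in [0, base))
def pvDigitOK (base : Int) (c : Char) : Bool :=
  match PySem.Int.ofCharsBase? [c] base with
  | some v => decide (0 ≤ v ∧ v < base)
  | none => false

-- Pre_ is exactly where the Python A returns: it excludes only inputs where A raises —
-- the empty list (IndexError on array[0]) and, when array[0] is nonempty, a base outside
-- 2..36 (ValueError from int / IndexError on count[x]), a string shorter than array[0]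
-- (IndexError), or a character int() rejects in that base (ValueError).
def Pre_radix_counting_sort_py (array : List String) (base : Int) : Prop :=
  array ≠ [] ∧
  ((array.headD "").toList.length = 0 ∨
   (2 ≤ base ∧ base ≤ 36 ∧
    ∀ s ∈ array, (array.headD "").toList.length ≤ s.toList.length ∧
      ∀ d < (array.headD "").toList.length, pvDigitOK base (s.toList.getD d ' ') = true))
instance (array : List String) (base : Int) : Decidable (Pre_radix_counting_sort_py array base) := by
  unfold Pre_radix_counting_sort_py; infer_instance

def pvWitness_radix_counting_sort_py : List String × Int := (["52", "09", "31"], 10)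

def Spec_radix_counting_sort_py (array : List String) (base : Int) (out : List String) : Prop :=
  out = radix_counting_sort_py_alt array base
instance (array : List String) (base : Int) (out : List String) :
    Decidable (Spec_radix_counting_sort_py array base out) := by
  unfold Spec_radix_counting_sort_py; infer_instance

-- ===== CLAIM (what is proved, stated in full; the proofs are below) =====
def Claim_equal_radix_counting_sort_py : Prop :=
  ∀ (array : List String) (base : Int), Dom_radix_counting_sort_py array base →
    Pre_radix_counting_sort_py array base →
    Spec_radix_counting_sort_py array base (radix_counting_sort_py array base)

-- ===== LEMMAS AND PROOFS =====

-- the bucket of digit value x, in input order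
def pvFilt (base d : Int) (arr : List String) (x : Nat) : List String :=
  arr.filter (fun s => (pvKey base d s).toNat = x)

-- number of elements whose digit value is < x (prefix offsets of the buckets)
def pvS (base d : Int) (arr : List String) (x : Nat) : Nat :=
  ((List.range x).map (fun y => (pvFilt base d arr y).length)).sum

theorem pv_foldl_count {α : Type} (l : List α) (c0 : Int) :
    l.foldl (fun c _ => c + 1) c0 = c0 + l.length := by
  induction l generalizing c0 with
  | nil => simp
  | cons a t ih => simp [List.foldl_cons, ih]; ring

theorem pv_getD_map_range {β : Type} (m x : Nat) (f : Nat → β) (dflt : β) (hx : x < m) :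
    ((List.range m).map f).getD x dflt = f x := by
  simp [List.getD_eq_getElem?_getD, hx]

theorem pv_getD_set {α : Type} (l : List α) (i j : Nat) (v dflt : α) :
    (l.set i v).getD j dflt = if i = j ∧ i < l.length then v else l.getD j dflt := by
  simp only [List.getD_eq_getElem?_getD, List.getElem?_set]
  by_cases h1 : i = j
  · subst h1
    by_cases h2 : i < l.length
    · simp [h2]
    · simp [h2]
  · simp [h1]

theorem pv_set_map_range {β : Type} (m j : Nat) (g : Nat → β) (v : β) :
    ((List.range m).map g).set j v = (List.range m).map (fun x => if x = j then v else g x) := by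
  apply List.ext_getElem
  · simp
  · intro i h1 h2
    simp only [List.getElem_set, List.getElem_map, List.getElem_range]
    by_cases h : i = j
    · simp [h]
    · simp [h, Ne.symm h]

theorem pv_scatter {β : Type} (key : String → Int) (upd : β → String → β) (dflt : β) (m : Nat) :
    ∀ (arr : List String), (∀ s ∈ arr, 0 ≤ key s ∧ (key s).toNat < m) →
    ∀ g : Nat → β,
      arr.foldl (fun c s =>
          PySem.List.pySetD c (key s) (upd (PySem.List.pyGetD c (key s) dflt) s))
        ((List.range m).map g)
      = (List.range m).map (fun x => (arr.filter (fun s => (key s).toNat = x)).foldl upd (g x)) := by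
  intro arr
  induction arr with
  | nil => intro _ g; simp
  | cons a t ih =>
    intro hv g
    obtain ⟨h0, hm⟩ := hv a (by simp)
    simp only [List.foldl_cons]
    have hga : PySem.List.pyGetD ((List.range m).map g) (key a) dflt = g (key a).toNat := by
      rw [PySem.List.pyGetD_eq_getElem _ _ h0 (by simp; omega)]
      simp
    rw [hga, PySem.List.pySetD_of_nonneg _ _ h0, pv_set_map_range]
    rw [ih (fun s hs => hv s (by simp [hs]))]
    apply List.map_congr_left
    intro x hx
    simp only [List.mem_range] at hx
    by_cases hk : (key a).toNat = x
    · subst hk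
      simp [List.filter_cons]
    · simp [List.filter_cons, hk, Ne.symm hk]

theorem pv_prefix_aux (m : Nat) (f : Nat → Int) :
    ∀ j, j ≤ m → (PySem.List.pyRange 1 (j : Int) 1).foldl
        (fun c i => PySem.List.pySetD c i (PySem.List.pyGetD c i 0 + PySem.List.pyGetD c (i - 1) 0))
        ((List.range m).map f)
      = (List.range m).map (fun x => if x < j ∧ 0 < x then ((List.range (x + 1)).map f).sum else f x) := by
  intro j
  induction j with
  | zero =>
    intro _
    rw [PySem.List.pyRange_one_eq_nil (by omega)]
    simp
  | succ j ih =>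
    intro hj
    by_cases hj1 : j = 0
    · subst hj1
      rw [PySem.List.pyRange_one_eq_nil (by omega)]
      simp only [List.foldl_nil]
      apply List.map_congr_left
      intro x hx
      have : ¬(x < 1 ∧ 0 < x) := by omega
      simp [this]
    · have h1j : 1 ≤ j := by omega
      have hcast : ((j + 1 : Nat) : Int) = (j : Int) + 1 := by push_cast; ring
      rw [hcast, PySem.List.pyRange_one_succ_right (by omega), List.foldl_append, ih (by omega)]
      simp only [List.foldl_cons, List.foldl_nil]
      have hjm : j < m := by omega
      have hga : ∀ (y : Nat), y < m →
          PySem.List.pyGetD ((List.range m).map (fun x => if x < j ∧ 0 < x then ((List.range (x + 1)).map f).sum else f x)) (y : Int) 0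
            = if y < j ∧ 0 < y then ((List.range (y + 1)).map f).sum else f y := by
        intro y hy
        rw [PySem.List.pyGetD_eq_getElem _ _ (by omega) (by simp; omega)]
        simp
      have e1 : ((j : Int) - 1) = ((j - 1 : Nat) : Int) := by omega
      rw [hga j hjm, e1, hga (j - 1) (by omega), PySem.List.pySetD_of_nonneg _ _ (by omega)]
      have e2 : ((j : Int)).toNat = j := by omega
      rw [e2, pv_set_map_range]
      apply List.map_congr_left
      intro x hx
      simp only [List.mem_range] at hx
      by_cases hxj : x = j
      · subst hxj
        have hc1 : ¬(x < x ∧ 0 < x) := by omega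
        have hc2 : x < x + 1 ∧ 0 < x := by omega
        simp only [if_pos rfl, if_pos hc2, if_neg hc1]
        by_cases hj2 : x = 1
        · subst hj2
          simp [List.range_succ, List.range_one]
          ring
        · obtain ⟨y, rfl⟩ : ∃ y, x = y + 2 := ⟨x - 2, by omega⟩
          simp only [show y + 2 - 1 = y + 1 from by omega]
          have hcc : y + 1 < y + 2 ∧ 0 < y + 1 := by omega
          simp only [if_pos hcc]
          simp [List.range_succ]
          ring
      · simp only [if_neg hxj]
        simp [show (x ≤ j ∧ 0 < x) ↔ (x < j ∧ 0 < x) from by omega]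

theorem pv_prefix (m : Nat) (f : Nat → Int) :
    pvPassPrefix ((List.range m).map f)
      = (List.range m).map (fun x => ((List.range (x + 1)).map f).sum) := by
  unfold pvPassPrefix
  rw [show (((List.range m).map f).length : Int) = (m : Int) by simp]
  rw [pv_prefix_aux m f m le_rfl]
  apply List.map_congr_left
  intro x hx
  simp only [List.mem_range] at hx
  by_cases hx0 : 0 < x
  · simp [hx, hx0]
  · have hx0' : x = 0 := by omega
    subst hx0'
    simp
theorem pv_S_succ (base d : Int) (arr : List String) (x : Nat) :
    pvS base d arr (x + 1) = pvS base d arr x + (pvFilt base d arr x).length := by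
  simp [pvS, List.range_succ]

theorem pv_S_mono (base d : Int) (arr : List String) {a b : Nat} (h : a ≤ b) :
    pvS base d arr a ≤ pvS base d arr b := by
  induction b with
  | zero => have e : a = 0 := by omega
            rw [e]
  | succ t ih =>
    rcases Nat.lt_or_ge a (t + 1) with hlt | hge
    · have h1 := pv_S_succ base d arr t
      have h2 := ih (by omega)
      omega
    · have e : a = t + 1 := by omega
      rw [e]

theorem pv_sum_indicator (m j : Nat) (hj : j < m) :
    ((List.range m).map (fun y => if j = y then 1 else 0)).sum = 1 := by
  induction m with
  | zero => omega
  | succ t ih =>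
    rw [List.range_succ, List.map_append, List.sum_append]
    by_cases h : j < t
    · simp [ih h]; omega
    · have hjt : j = t := by omega
      subst hjt
      have hz : ((List.range j).map (fun y => if j = y then (1:Nat) else 0)).sum = 0 := by
        apply List.sum_eq_zero_iff_forall_eq_nat.mpr
        intro x hx
        simp only [List.mem_map, List.mem_range] at hx
        obtain ⟨y, hy, rfl⟩ := hx
        simp; omega
      simp [hz]

theorem pv_S_total (base d : Int) (arr : List String) (m : Nat)
    (hv : ∀ s ∈ arr, (pvKey base d s).toNat < m) :
    pvS base d arr m = arr.length := by
  induction arr with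
  | nil => simp [pvS, pvFilt]
  | cons a t ih =>
    have hlen : ∀ y, (pvFilt base d (a :: t) y).length
        = (if (pvKey base d a).toNat = y then 1 else 0) + (pvFilt base d t y).length := by
      intro y
      simp only [pvFilt, List.filter_cons]
      by_cases h : (pvKey base d a).toNat = y
      · simp [h]; omega
      · simp [h]
    have : pvS base d (a :: t) m
        = ((List.range m).map (fun y => if (pvKey base d a).toNat = y then 1 else 0)).sum
          + pvS base d t m := by
      unfold pvS
      rw [← List.sum_map_add]
      apply congrArg
      apply List.map_congr_left
      intro y _
      exact hlen y
    rw [this, pv_sum_indicator m _ (hv a (by simp)), ih (fun s hs => hv s (by simp [hs]))]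
    simp; omega

theorem pv_flatten_length {β : Type} (m : Nat) (F : Nat → List β) :
    (((List.range m).map F).flatten).length = ((List.range m).map (fun y => (F y).length)).sum := by
  induction m with
  | zero => simp
  | succ t ih => simp [List.range_succ, ih]

theorem pv_sum_range_mono {β : Type} (F : Nat → List β) {a b : Nat} (h : a ≤ b) :
    ((List.range a).map (fun y => (F y).length)).sum ≤ ((List.range b).map (fun y => (F y).length)).sum := by
  induction b with
  | zero => have e : a = 0 := by omega
            rw [e]
  | succ t ih =>
    rcases Nat.lt_or_ge a (t + 1) with hlt | hge
    · have h2 := ih (by omega)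
      rw [List.range_succ, List.map_append, List.sum_append]
      simp; omega
    · have e : a = t + 1 := by omega
      rw [e]

theorem pv_flatten_getD {β : Type} (F : Nat → List β) (dflt : β) :
    ∀ (m x : Nat), x < m → ∀ j, j < (F x).length →
      (((List.range m).map F).flatten).getD
        ((((List.range x).map (fun y => (F y).length)).sum) + j) dflt = (F x).getD j dflt := by
  intro m
  induction m with
  | zero => intro x hx; omega
  | succ t ih =>
    intro x hx j hj
    rw [List.range_succ, List.map_append, List.flatten_append]
    by_cases hxt : x < t
    · rw [List.getD_append]
      · exact ih x hxt j hj
      · rw [pv_flatten_length]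
        have h1 := pv_sum_range_mono F (show x + 1 ≤ t from by omega)
        have h2 : ((List.range (x+1)).map (fun y => (F y).length)).sum
            = ((List.range x).map (fun y => (F y).length)).sum + (F x).length := by
          simp [List.range_succ]
        omega
    · have hxt' : x = t := by omega
      subst hxt'
      rw [List.getD_append_right _ _ _ _ (by rw [pv_flatten_length]; omega)]
      rw [pv_flatten_length]
      rw [show (List.map (fun y => (F y).length) (List.range x)).sum + j
            - (List.map (fun y => (F y).length) (List.range x)).sum = j from by omega]
      simp

theorem pv_cover {β : Type} (F : Nat → List β) :
    ∀ (m p : Nat), p < ((List.range m).map (fun y => (F y).length)).sum →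
      ∃ x, x < m ∧ ((List.range x).map (fun y => (F y).length)).sum ≤ p
        ∧ p < ((List.range (x+1)).map (fun y => (F y).length)).sum := by
  intro m
  induction m with
  | zero => simp
  | succ t ih =>
    intro p hp
    by_cases h : p < ((List.range t).map (fun y => (F y).length)).sum
    · obtain ⟨x, h1, h2, h3⟩ := ih p h
      exact ⟨x, by omega, h2, h3⟩
    · exact ⟨t, by omega, by omega, hp⟩

theorem pv_take_set {α : Type} (a : List α) (k : Nat) (v : α) (h : k < a.length) :
    (a.set k v).take (k + 1) = a.take k ++ [v] := by
  apply List.ext_getElem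
  · simp; omega
  · intro i h1 h2
    simp only [List.getElem_take, List.getElem_set]
    by_cases hik : i = k
    · subst hik
      rw [List.getElem_append_right (by simp [List.length_take, show min i a.length = i from by omega])]
      simp [List.length_take, show min i a.length = i from by omega]
    · rw [List.getElem_append_left (by simp [List.length_take] at h2 ⊢; omega)]
      rw [if_neg (Ne.symm hik), List.getElem_take]

theorem pv_copy_aux (res : List String) :
    ∀ (t k : Nat) (a : List String), res.length - k = t → k ≤ res.length → a.length = res.length →
      (PySem.List.pyRange (k : Int) (res.length : Int) 1).foldl
        (fun a i => PySem.List.pySetD a i (PySem.List.pyGetD res i "")) a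
      = a.take k ++ res.drop k := by
  intro t
  induction t with
  | zero =>
    intro k a ht hk ha
    have hk' : k = res.length := by omega
    subst hk'
    rw [PySem.List.pyRange_one_eq_nil (by omega)]
    simp [List.take_of_length_le (by omega : a.length ≤ res.length)]
  | succ t ih =>
    intro k a ht hk ha
    have hklt : k < res.length := by omega
    rw [PySem.List.pyRange_one_cons (by exact_mod_cast hklt)]
    simp only [List.foldl_cons]
    rw [PySem.List.pySetD_of_nonneg _ _ (by positivity),
        PySem.List.pyGetD_eq_getElem _ _ (by positivity) (by exact_mod_cast hklt)]
    simp only [Int.toNat_natCast]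
    rw [show ((k : Int) + 1) = ((k + 1 : Nat) : Int) from by push_cast; ring]
    rw [ih (k + 1) _ (by omega) (by omega) (by simpa using ha)]
    rw [pv_take_set a k _ (by omega)]
    rw [show res.drop k = res[k] :: res.drop (k + 1) from List.drop_eq_getElem_cons hklt]
    simp

theorem pv_copy (arr res : List String) (h : arr.length = res.length) :
    pvPassCopy arr res = res := by
  unfold pvPassCopy
  rw [h]
  have h0 := pv_copy_aux res res.length 0 arr (by omega) (by omega) h
  simp only [Nat.cast_zero] at h0
  rw [h0]
  simp
theorem pv_place_eq (base d : Int) (arr : List String) (cnt : List Int) (res : List String) :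
    pvPassPlace base d arr cnt res
      = arr.reverse.foldl (fun p s =>
          let x := pvKey base d s
          let ci := PySem.List.pyGetD p.1 x 0 - 1
          (PySem.List.pySetD p.1 x (PySem.List.pyGetD p.1 x 0 - 1),
           PySem.List.pySetD p.2 ci s)) (cnt, res) := by
  unfold pvPassPlace
  rw [PySem.List.pyRange_neg_one_eq_reverse]
  rw [show ((-1 : Int) + 1) = 0 from by ring, show ((arr.length : Int) - 1 + 1) = (arr.length : Int) from by ring]
  conv_rhs => rw [← PySem.List.map_pyGetD_pyRange_zero' arr ""]
  rw [← List.map_reverse, List.foldl_map]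

theorem pv_place_aux (base d : Int) (m n : Nat) (S : Nat → Nat)
    (hmono : ∀ a b : Nat, a ≤ b → S a ≤ S b) (hSn : S m ≤ n) :
    ∀ (M : List String) (cnt : List Int) (res : List String),
      cnt.length = m → res.length = n →
      (∀ s ∈ M, 0 ≤ pvKey base d s ∧ (pvKey base d s).toNat < m) →
      (∀ x, x < m → (pvFilt base d M x).length + S x ≤ S (x + 1)) →
      (∀ x, x < m → cnt.getD x 0 = (S (x + 1) : Int)) →
      ((M.reverse.foldl (fun p s =>
          let x := pvKey base d s
          let ci := PySem.List.pyGetD p.1 x 0 - 1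
          (PySem.List.pySetD p.1 x (PySem.List.pyGetD p.1 x 0 - 1),
           PySem.List.pySetD p.2 ci s)) (cnt, res)).1.length = m ∧
       (M.reverse.foldl (fun p s =>
          let x := pvKey base d s
          let ci := PySem.List.pyGetD p.1 x 0 - 1
          (PySem.List.pySetD p.1 x (PySem.List.pyGetD p.1 x 0 - 1),
           PySem.List.pySetD p.2 ci s)) (cnt, res)).2.length = n ∧
       (∀ x, x < m →
        (M.reverse.foldl (fun p s =>
          let x := pvKey base d s
          let ci := PySem.List.pyGetD p.1 x 0 - 1
          (PySem.List.pySetD p.1 x (PySem.List.pyGetD p.1 x 0 - 1),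
           PySem.List.pySetD p.2 ci s)) (cnt, res)).1.getD x 0
          = (S (x + 1) : Int) - (pvFilt base d M x).length) ∧
       (∀ x, x < m → ∀ j, j < (pvFilt base d M x).length →
        (M.reverse.foldl (fun p s =>
          let x := pvKey base d s
          let ci := PySem.List.pyGetD p.1 x 0 - 1
          (PySem.List.pySetD p.1 x (PySem.List.pyGetD p.1 x 0 - 1),
           PySem.List.pySetD p.2 ci s)) (cnt, res)).2.getD (S (x + 1) - (pvFilt base d M x).length + j) ""
          = (pvFilt base d M x).getD j "") ∧
       (∀ p, p < n →
        (∀ x, x < m → ¬(S (x + 1) - (pvFilt base d M x).length ≤ p ∧ p < S (x + 1))) →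
        (M.reverse.foldl (fun p s =>
          let x := pvKey base d s
          let ci := PySem.List.pyGetD p.1 x 0 - 1
          (PySem.List.pySetD p.1 x (PySem.List.pyGetD p.1 x 0 - 1),
           PySem.List.pySetD p.2 ci s)) (cnt, res)).2.getD p "" = res.getD p "")) := by
  intro M
  induction M with
  | nil =>
    intro cnt res hc hr hv hfit hcnt
    simp only [List.reverse_nil, List.foldl_nil]
    refine ⟨hc, hr, ?_, ?_, ?_⟩
    · intro x hx; rw [hcnt x hx]; simp [pvFilt]
    · intro x hx j hj; simp [pvFilt] at hj
    · intro p hp _; trivial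
  | cons a M' ih =>
    intro cnt res hc hr hv hfit hcnt
    obtain ⟨ha0, ham⟩ := hv a (by simp)
    set x0 := (pvKey base d a).toNat with hx0def
    have hfilt_cons : ∀ x : Nat, pvFilt base d (a :: M') x
        = if x0 = x then a :: pvFilt base d M' x else pvFilt base d M' x := by
      intro x
      simp only [pvFilt, List.filter_cons]
      by_cases h : x0 = x
      · simp [← hx0def, h]
      · simp [← hx0def, h]
    have hlen_le : ∀ x : Nat, (pvFilt base d M' x).length ≤ (pvFilt base d (a :: M') x).length := by
      intro x; rw [hfilt_cons x]; split
      · simp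
      · exact le_rfl
    have hv' : ∀ s ∈ M', 0 ≤ pvKey base d s ∧ (pvKey base d s).toNat < m :=
      fun s hs => hv s (by simp [hs])
    have hfit' : ∀ x, x < m → (pvFilt base d M' x).length + S x ≤ S (x + 1) := by
      intro x hx
      have h1 := hfit x hx
      have h2 := hlen_le x
      omega
    obtain ⟨ihc1, ihr1, ihcnt, ihvals, ihrest⟩ := ih cnt res hc hr hv' hfit' hcnt
    simp only [List.reverse_cons, List.foldl_append, List.foldl_cons, List.foldl_nil]
    have hflen : (pvFilt base d (a :: M') x0).length = (pvFilt base d M' x0).length + 1 := by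
      rw [hfilt_cons x0]; simp
    have hfit0 := hfit x0 ham
    have hSm0 : S (x0 + 1) ≤ S m := hmono _ _ (by omega)
    have hgx0 : PySem.List.pyGetD
        ((M'.reverse.foldl (fun p s =>
          let x := pvKey base d s
          let ci := PySem.List.pyGetD p.1 x 0 - 1
          (PySem.List.pySetD p.1 x (PySem.List.pyGetD p.1 x 0 - 1),
           PySem.List.pySetD p.2 ci s)) (cnt, res)).1) (pvKey base d a) 0
        = (S (x0 + 1) : Int) - (pvFilt base d M' x0).length := by
      rw [PySem.List.pyGetD_eq_getElem _ _ ha0 (by rw [ihc1]; omega)]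
      rw [← List.getD_eq_getElem _ 0 (by rw [ihc1]; exact (by omega : (pvKey base d a).toNat < m))]
      exact ihcnt x0 ham
    set pN : Nat := S (x0 + 1) - (pvFilt base d (a :: M') x0).length with hpN
    have hpos_le : (pvFilt base d M' x0).length + 1 ≤ S (x0 + 1) := by omega
    have hciN : (S (x0 + 1) : Int) - (pvFilt base d M' x0).length - 1 = (pN : Int) := by
      rw [hpN, hflen]; omega
    have hpN_lt : pN < n := by omega
    have hstep1 : PySem.List.pySetD
        ((M'.reverse.foldl (fun p s =>
          let x := pvKey base d s
          let ci := PySem.List.pyGetD p.1 x 0 - 1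
          (PySem.List.pySetD p.1 x (PySem.List.pyGetD p.1 x 0 - 1),
           PySem.List.pySetD p.2 ci s)) (cnt, res)).1) (pvKey base d a)
          (PySem.List.pyGetD ((M'.reverse.foldl (fun p s =>
          let x := pvKey base d s
          let ci := PySem.List.pyGetD p.1 x 0 - 1
          (PySem.List.pySetD p.1 x (PySem.List.pyGetD p.1 x 0 - 1),
           PySem.List.pySetD p.2 ci s)) (cnt, res)).1) (pvKey base d a) 0 - 1)
        = ((M'.reverse.foldl (fun p s =>
          let x := pvKey base d s
          let ci := PySem.List.pyGetD p.1 x 0 - 1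
          (PySem.List.pySetD p.1 x (PySem.List.pyGetD p.1 x 0 - 1),
           PySem.List.pySetD p.2 ci s)) (cnt, res)).1).set x0
            ((S (x0 + 1) : Int) - (pvFilt base d (a :: M') x0).length) := by
      rw [hgx0, PySem.List.pySetD_of_nonneg _ _ ha0]
      congr 1
      rw [hflen]; push_cast; ring
    have hstep2 : PySem.List.pySetD
        ((M'.reverse.foldl (fun p s =>
          let x := pvKey base d s
          let ci := PySem.List.pyGetD p.1 x 0 - 1
          (PySem.List.pySetD p.1 x (PySem.List.pyGetD p.1 x 0 - 1),
           PySem.List.pySetD p.2 ci s)) (cnt, res)).2)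
          (PySem.List.pyGetD ((M'.reverse.foldl (fun p s =>
          let x := pvKey base d s
          let ci := PySem.List.pyGetD p.1 x 0 - 1
          (PySem.List.pySetD p.1 x (PySem.List.pyGetD p.1 x 0 - 1),
           PySem.List.pySetD p.2 ci s)) (cnt, res)).1) (pvKey base d a) 0 - 1) a
        = ((M'.reverse.foldl (fun p s =>
          let x := pvKey base d s
          let ci := PySem.List.pyGetD p.1 x 0 - 1
          (PySem.List.pySetD p.1 x (PySem.List.pyGetD p.1 x 0 - 1),
           PySem.List.pySetD p.2 ci s)) (cnt, res)).2).set pN a := by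
      rw [hgx0, hciN, PySem.List.pySetD_of_nonneg _ _ (by exact_mod_cast Nat.zero_le pN)]
      norm_num
    refine ⟨?_, ?_, ?_, ?_, ?_⟩
    · show (PySem.List.pySetD _ _ _).length = m
      rw [hstep1, List.length_set]; exact ihc1
    · show (PySem.List.pySetD _ _ _).length = n
      rw [hstep2, List.length_set]; exact ihr1
    · intro x hx
      show (PySem.List.pySetD _ _ _).getD x 0 = _
      rw [hstep1, pv_getD_set]
      by_cases hxx : x0 = x
      · subst hxx
        rw [if_pos ⟨rfl, by omega⟩]
      · rw [if_neg (by rw [ihc1]; tauto)]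
        rw [ihcnt x hx, hfilt_cons x, if_neg hxx]
    · intro x hx j hj
      show (PySem.List.pySetD _ _ _).getD _ "" = _
      rw [hstep2, pv_getD_set, ihr1]
      by_cases hxx : x0 = x
      · subst hxx
        rcases Nat.eq_zero_or_pos j with rfl | hj0
        · rw [if_pos ⟨by omega, hpN_lt⟩, hfilt_cons x0, if_pos rfl]
          simp
        · rw [if_neg (by omega)]
          have epos : S (x0 + 1) - (pvFilt base d (a :: M') x0).length + j
              = S (x0 + 1) - (pvFilt base d M' x0).length + (j - 1) := by omega
          rw [epos, ihvals x0 ham (j - 1) (by omega)]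
          rw [hfilt_cons x0, if_pos rfl, show j = (j - 1) + 1 from by omega]
          simp
      · have hflenx : (pvFilt base d (a :: M') x).length = (pvFilt base d M' x).length := by
          rw [hfilt_cons x, if_neg hxx]
        have hz1 := hfit x hx
        have hz0 := hfit x0 ham
        have hne : pN ≠ S (x + 1) - (pvFilt base d (a :: M') x).length + j := by
          rcases (by omega : x < x0 ∨ x0 < x) with hlt | hlt
          · have hmx := hmono (x + 1) x0 (by omega)
            omega
          · have hmx := hmono (x0 + 1) x (by omega)
            omega
        rw [if_neg (fun hcon => hne hcon.1)]
        rw [hfilt_cons x, if_neg hxx]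
        rw [hflenx] at hj
        exact ihvals x hx j hj
    · intro p hp hout
      show (PySem.List.pySetD _ _ _).getD p "" = _
      rw [hstep2, pv_getD_set, ihr1]
      have hout0 := hout x0 ham
      rw [if_neg (by omega)]
      apply ihrest p hp
      intro x hx
      have h1 := hout x hx
      have h2 := hlen_le x
      have h3 := hfit x hx
      omega

theorem pv_key_valid (base : Int) (L : Nat) (s : String)
    (hlen : L ≤ s.toList.length)
    (hok : ∀ dd < L, pvDigitOK base (s.toList.getD dd ' ') = true)
    (dd : Int) (h0 : 0 ≤ dd) (h1 : dd < (L : Int)) :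
    0 ≤ pvKey base dd s ∧ pvKey base dd s < base := by
  have hd : dd.toNat < L := by omega
  have hds : dd.toNat < s.toList.length := by omega
  have hc := hok dd.toNat hd
  unfold pvKey
  rw [show dd = ((dd.toNat : Nat) : Int) from by omega, PySem.Str.pyGet?_natCast]
  rw [List.getElem?_eq_getElem hds]
  simp only [Option.getD_some]
  rw [List.getD_eq_getElem _ _ hds] at hc
  unfold pvDigitOK at hc
  cases h : PySem.Int.ofCharsBase? [s.toList[dd.toNat]] base with
  | none => rw [h] at hc; simp at hc
  | some v =>
    rw [h] at hc
    simp only [decide_eq_true_eq] at hc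
    simpa using hc

theorem pv_buckets_eq (base d : Int) (arr : List String)
    (hv : ∀ s ∈ arr, 0 ≤ pvKey base d s ∧ pvKey base d s < base) :
    pvPassBuckets base d arr = (List.range base.toNat).map (pvFilt base d arr) := by
  have hv' : ∀ s ∈ arr, 0 ≤ pvKey base d s ∧ (pvKey base d s).toNat < base.toNat :=
    fun s hs => ⟨(hv s hs).1, by have := hv s hs; omega⟩
  have hrep : List.replicate base.toNat ([] : List String)
      = (List.range base.toNat).map (fun _ => ([] : List String)) := by
    simp
  unfold pvPassBuckets
  rw [hrep]
  refine (pv_scatter (pvKey base d) (fun b s => b ++ [s]) ([] : List String) base.toNat arr hv'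
    (fun _ => [])).trans ?_
  apply List.map_congr_left
  intro x _
  rw [PySem.List.foldl_append_singleton]
  simp [pvFilt]

theorem pv_passA (base d : Int) (arr res : List String)
    (hb : 2 ≤ base)
    (hv : ∀ s ∈ arr, 0 ≤ pvKey base d s ∧ pvKey base d s < base)
    (hres : res.length = arr.length) :
    (pvPassPlace base d arr (pvPassPrefix (pvPassCount base d arr (List.replicate base.toNat 0))) res).2
      = (pvPassBuckets base d arr).flatten
    ∧ ((pvPassBuckets base d arr).flatten).length = arr.length := by
  have hv' : ∀ s ∈ arr, 0 ≤ pvKey base d s ∧ (pvKey base d s).toNat < base.toNat :=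
    fun s hs => ⟨(hv s hs).1, by have := hv s hs; omega⟩
  have htot : pvS base d arr base.toNat = arr.length :=
    pv_S_total base d arr base.toNat (fun s hs => (hv' s hs).2)
  have hrep : (List.replicate base.toNat (0 : Int))
      = (List.range base.toNat).map (fun _ => (0 : Int)) := by simp
  have hcount : pvPassCount base d arr (List.replicate base.toNat 0)
      = (List.range base.toNat).map (fun x => ((pvFilt base d arr x).length : Int)) := by
    have e1 := PySem.List.foldl_pyRange_zero_pyGetD' arr ""
      (fun c s =>
        let x := pvKey base d s
        PySem.List.pySetD c x (PySem.List.pyGetD c x 0 + 1))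
      (List.replicate base.toNat (0 : Int))
    refine e1.trans ?_
    rw [hrep]
    refine (pv_scatter (pvKey base d) (fun c _ => c + 1) (0 : Int) base.toNat arr hv'
      (fun _ => 0)).trans ?_
    apply List.map_congr_left
    intro x _
    rw [pv_foldl_count]
    simp [pvFilt]
  have hpref : pvPassPrefix ((List.range base.toNat).map (fun x => ((pvFilt base d arr x).length : Int)))
      = (List.range base.toNat).map (fun x => (pvS base d arr (x + 1) : Int)) := by
    rw [pv_prefix]
    apply List.map_congr_left
    intro x _
    simp [pvS, Nat.cast_list_sum, List.map_map, Function.comp_def]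
  obtain ⟨hl1, hl2, hcnt', hvals, hrest⟩ :=
    pv_place_aux base d base.toNat arr.length (pvS base d arr)
      (fun a b h => pv_S_mono base d arr h) (le_of_eq htot) arr
      ((List.range base.toNat).map (fun x => (pvS base d arr (x + 1) : Int))) res
      (by simp) hres hv'
      (fun x hx => by rw [pv_S_succ]; omega)
      (fun x hx => by rw [pv_getD_map_range _ _ _ _ hx])
  have hflatlen : ((pvPassBuckets base d arr).flatten).length = arr.length := by
    rw [pv_buckets_eq base d arr hv, pv_flatten_length]
    exact htot
  refine ⟨?_, hflatlen⟩
  rw [hcount, hpref, pv_place_eq, pv_buckets_eq base d arr hv]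
  apply List.ext_getElem
  · rw [hl2, pv_flatten_length]
    exact htot.symm
  · intro i h1 h2
    have hn : i < arr.length := by rw [hl2] at h1; exact h1
    obtain ⟨x, hxm, hge, hlt⟩ := pv_cover (pvFilt base d arr) base.toNat i
      (by rw [show ((List.range base.toNat).map (fun y => (pvFilt base d arr y).length)).sum
                = pvS base d arr base.toNat from rfl, htot]; exact hn)
    have hSx : ((List.range x).map (fun y => (pvFilt base d arr y).length)).sum
        = pvS base d arr x := rfl
    have hSx1 : ((List.range (x + 1)).map (fun y => (pvFilt base d arr y).length)).sum
        = pvS base d arr (x + 1) := rfl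
    rw [hSx] at hge
    rw [hSx1] at hlt
    have hsucc := pv_S_succ base d arr x
    have hj : i - pvS base d arr x < (pvFilt base d arr x).length := by omega
    rw [← List.getD_eq_getElem _ "" h1, ← List.getD_eq_getElem _ "" h2]
    have e1 := hvals x hxm (i - pvS base d arr x) hj
    rw [show pvS base d arr (x + 1) - (pvFilt base d arr x).length + (i - pvS base d arr x)
          = i from by omega] at e1
    have e2 := pv_flatten_getD (pvFilt base d arr) "" base.toNat x hxm (i - pvS base d arr x) hj
    rw [hSx] at e2
    rw [show pvS base d arr x + (i - pvS base d arr x) = i from by omega] at e2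
    rw [e1, e2]

theorem pv_outer (array : List String) (base : Int) (hb : 2 ≤ base) (L : Nat)
    (hvalid : ∀ s ∈ array, ∀ dd < L, pvDigitOK base (s.toList.getD dd ' ') = true)
    (hlen : ∀ s ∈ array, L ≤ s.toList.length) :
    ∀ (ds : List Int), (∀ dd ∈ ds, 0 ≤ dd ∧ dd < (L : Int)) →
    ∀ (arr res : List String),
      res.length = arr.length →
      (∀ s ∈ arr, s ∈ array) →
      (ds.foldl (fun st d =>
          let cnt1 := pvPassCount base d st.1 st.2.2
          let cnt2 := pvPassPrefix cnt1
          let pr := pvPassPlace base d st.1 cnt2 st.2.1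
          let res3 := pr.2
          let arr4 := pvPassCopy st.1 res3
          (arr4, res3, List.replicate base.toNat (0 : Int)))
        (arr, res, List.replicate base.toNat (0 : Int))).1
      = ds.foldl (fun arr d => (pvPassBuckets base d arr).flatten) arr := by
  intro ds
  induction ds with
  | nil => intro _ arr res _ _; rfl
  | cons dd ds' ih =>
    intro hds arr res hres hmem
    obtain ⟨hd0, hd1⟩ := hds dd (by simp)
    have hv : ∀ s ∈ arr, 0 ≤ pvKey base dd s ∧ pvKey base dd s < base :=
      fun s hs => pv_key_valid base L s (hlen s (hmem s hs)) (hvalid s (hmem s hs)) dd hd0 hd1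
    obtain ⟨hflat, hflen⟩ := pv_passA base dd arr res hb hv hres
    have hcopy : pvPassCopy arr
        (pvPassPlace base dd arr (pvPassPrefix (pvPassCount base dd arr (List.replicate base.toNat 0))) res).2
        = (pvPassBuckets base dd arr).flatten := by
      rw [hflat]
      exact pv_copy arr _ (by rw [hflen])
    have hmem' : ∀ s ∈ (pvPassBuckets base dd arr).flatten, s ∈ array := by
      intro s hs
      rw [pv_buckets_eq base dd arr hv, List.mem_flatten] at hs
      obtain ⟨l, hl, hsl⟩ := hs
      rw [List.mem_map] at hl
      obtain ⟨x, _, rfl⟩ := hl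
      exact hmem s (List.mem_of_mem_filter hsl)
    simp only [List.foldl_cons]
    have hstate : (pvPassCopy arr
          (pvPassPlace base dd arr (pvPassPrefix (pvPassCount base dd arr (List.replicate base.toNat (0 : Int)))) res).2,
        (pvPassPlace base dd arr (pvPassPrefix (pvPassCount base dd arr (List.replicate base.toNat (0 : Int)))) res).2,
        List.replicate base.toNat (0 : Int))
        = ((pvPassBuckets base dd arr).flatten, (pvPassBuckets base dd arr).flatten,
           List.replicate base.toNat (0 : Int)) := by
      rw [hcopy, hflat]
    rw [hstate]
    exact ih (fun dd' h => hds dd' (by simp [h])) _ _ rfl hmem'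


-- ===== VERDICT (by name: the statement is the Claim_ definition above) =====
theorem radix_counting_sort_py_spec : Claim_equal_radix_counting_sort_py := by
  unfold Claim_equal_radix_counting_sort_py
  intro array base _ hpre
  unfold Spec_radix_counting_sort_py
  obtain ⟨hne, hcase⟩ := hpre
  unfold radix_counting_sort_py radix_counting_sort_py_alt
  have hhead : PySem.List.pyGetD array 0 "" = array.headD "" := by
    cases array with
    | nil => rfl
    | cons a t => rw [PySem.List.pyGetD_zero_cons]; rfl
  rw [hhead, PySem.Str.len_eq]
  rcases hcase with hL0 | ⟨hb2, hb36, hforall⟩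
  · rw [hL0]
    rw [PySem.List.pyRange_neg_one_eq_nil (by omega)]
    rfl
  · exact pv_outer array base hb2 (array.headD "").toList.length
      (fun s hs => (hforall s hs).2) (fun s hs => (hforall s hs).1)
      (PySem.List.pyRange (((array.headD "").toList.length : Int) - 1) (-1) (-1))
      (fun dd hd => by rw [PySem.List.mem_pyRange_neg_one] at hd; omega)
      array (List.replicate array.length "") (by simp) (fun s hs => hs)
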